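-- pv_equiv track=rewrite | github.com/Tinczo/python-stdin | filter_lexicographically_ordered.py | is_lexicographically_ordered
-- ===== SOURCE A (Python) =====
-- def is_lexicographically_ordered(sentence):
--     """
--     Sprawdza, czy wyrazy w zdaniu są w porządku leksykograficznym.
--     """
--     words = []
--     word = ""
--
--     for char in sentence:
--         if char in ' \t\n\r\f\v.,!?:;()[]{}':
--             if word:
--                 words.append(word.lower())
--                 word = ""
--         else:
--             word += char
--
--     if word:
--         words.append(word.lower())
--
--     # Sprawdzamy, czy wyrazy są posortowane leksykograficznie
--     for i in range(1, len(words)):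
--         if words[i] < words[i-1]:
--             return False
--
--     return True
-- ===== SOURCE B (Python) =====
-- _DELIMS = set(' \t\n\r\f\v.,!?:;()[]{}')
--
--
-- def is_lexicographically_ordered(sentence):
--     normalized = ''.join(' ' if c in _DELIMS else c for c in sentence)
--     words = [w.lower() for w in normalized.split()]
--     return words == sorted(words)
-- ===== Notes on version B (the rewrite author's own statement) =====
-- stated objective: idiomatic
-- what changed: B replaces the char-accumulating tokenizer loop with normalize-delimiters-to-space + str.split(), and replaces the index-based adjacent-pair scan with words == sorted(words).
import Mathlib
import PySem

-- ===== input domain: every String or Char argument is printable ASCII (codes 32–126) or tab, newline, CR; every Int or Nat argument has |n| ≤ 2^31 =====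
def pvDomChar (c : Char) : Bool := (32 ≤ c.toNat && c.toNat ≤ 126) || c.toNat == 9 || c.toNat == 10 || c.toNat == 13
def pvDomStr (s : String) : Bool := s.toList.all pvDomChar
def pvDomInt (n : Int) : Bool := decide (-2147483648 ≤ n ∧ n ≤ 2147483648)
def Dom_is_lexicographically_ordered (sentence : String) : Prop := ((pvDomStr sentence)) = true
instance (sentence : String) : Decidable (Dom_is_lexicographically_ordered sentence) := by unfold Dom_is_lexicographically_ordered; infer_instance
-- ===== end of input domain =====

-- B: normalize delimiters to spaces + str.split() + "words == sorted(words)" instead of A's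
-- char-accumulating tokenizer loop and index-based adjacent-pair scan (objective: idiomatic).

-- shared literal: the delimiter characters ' \t\n\r\f\v.,!?:;()[]{}'
def pvDelims : List Char := " \t\n\r\x0C\x0B.,!?:;()[]{}".toList

-- ===== PORT A =====
-- loop state = (words, word); word kept as List Char, word.lower() is PySem.Chars.lower
def paStep (st : List String × List Char) (c : Char) : List String × List Char :=
  if c ∈ pvDelims then
    if st.2 ≠ [] then (st.1 ++ [String.ofList (PySem.Chars.lower st.2)], [])
    else st
  else (st.1, st.2 ++ [c])

def is_lexicographically_ordered (sentence : String) : Bool :=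
  let st := sentence.toList.foldl paStep ([], [])
  let words := if st.2 ≠ [] then st.1 ++ [String.ofList (PySem.Chars.lower st.2)] else st.1
  -- 'for i in range(1, len(words)): if words[i] < words[i-1]: return False' / 'return True'
  (PySem.List.pyRange 1 (PySem.List.len words) 1).all
    (fun i => !(decide (PySem.List.pyGetD words i "" < PySem.List.pyGetD words (i - 1) "")))

-- ===== PORT B =====
def is_lexicographically_ordered_alt (sentence : String) : Bool :=
  let normalized := String.ofList (sentence.toList.map (fun c => if c ∈ pvDelims then ' ' else c))
  let words := (PySem.Str.split₀ normalized).map PySem.Str.lower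
  words == PySem.List.sorted words (fun w => w) false

-- ===== PRECONDITION & SPEC =====
def Spec_is_lexicographically_ordered (sentence : String) (out : Bool) : Prop := out = is_lexicographically_ordered_alt sentence
instance (sentence : String) (out : Bool) : Decidable (Spec_is_lexicographically_ordered sentence out) := by unfold Spec_is_lexicographically_ordered; infer_instance

-- ===== CLAIM (what is proved, stated in full; the proofs are below) =====
def Claim_equal_is_lexicographically_ordered : Prop := ∀ (sentence : String), Dom_is_lexicographically_ordered sentence → Spec_is_lexicographically_ordered sentence (is_lexicographically_ordered sentence)

-- ===== LEMMAS AND PROOFS =====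

theorem pv_toNat_ne (c d : Char) (h : c ≠ d) : c.toNat ≠ d.toNat := by
  intro he; exact h (Char.ext (UInt32.toNat_inj.mp he))

-- a printable-ASCII/tab/newline/CR char outside the delimiter set is not Python whitespace
theorem pv_not_space (c : Char) (hd : pvDomChar c = true) (hn : c ∉ pvDelims) :
    PySem.Chars.isspace c = false := by
  simp only [pvDomChar, Bool.or_eq_true, Bool.and_eq_true, decide_eq_true_eq, beq_iff_eq] at hd
  cases h : PySem.Chars.isspace c
  · rfl
  · exfalso
    simp only [PySem.Chars.isspace, Bool.or_eq_true, Bool.and_eq_true, decide_eq_true_eq] at h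
    simp only [pvDelims,
      show (" \t\n\r\x0C\x0B.,!?:;()[]{}".toList) = [' ','\t','\n','\r','\x0C','\x0B','.',',','!','?',':',';','(',')','[',']','{','}'] from rfl,
      List.mem_cons, not_or] at hn
    have h32 := pv_toNat_ne c ' ' hn.1
    have h9 := pv_toNat_ne c '\t' hn.2.1
    have h10 := pv_toNat_ne c '\n' hn.2.2.1
    have h13 := pv_toNat_ne c '\r' hn.2.2.2.1
    have h12 := pv_toNat_ne c '\x0C' hn.2.2.2.2.1
    have h11 := pv_toNat_ne c '\x0B' hn.2.2.2.2.2.1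
    simp only [show (' '.toNat) = 32 from rfl, show ('\t'.toNat) = 9 from rfl,
      show ('\n'.toNat) = 10 from rfl, show ('\r'.toNat) = 13 from rfl,
      show ('\x0C'.toNat) = 12 from rfl, show ('\x0B'.toNat) = 11 from rfl] at *
    omega

-- split₀.go flushes its accumulator as a prefix
theorem pv_go_acc (cs : List Char) : ∀ (cur : List Char) (A : List (List Char)),
    PySem.Chars.split₀.go cs cur A = A.reverse ++ PySem.Chars.split₀.go cs cur [] := by
  induction cs with
  | nil =>
    intro cur A
    simp only [PySem.Chars.split₀.go]
    by_cases h : cur.isEmpty <;> simp [h]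
  | cons c rest ih =>
    intro cur A
    simp only [PySem.Chars.split₀.go]
    by_cases hs : PySem.Chars.isspace c <;> simp only [hs, if_true, if_false, Bool.false_eq_true]
    · by_cases hc : cur.isEmpty <;> simp only [hc, if_true, if_false, Bool.false_eq_true]
      · exact ih [] A
      · rw [ih [] (cur.reverse :: A), ih [] [cur.reverse]]
        simp
    · exact ih (c :: cur) A

-- the lowered word produced when A flushes
def pvLw (t : List Char) : String := String.ofList (PySem.Chars.lower t)

-- A's "append word at end of loop" finalisation
def pvFin (st : List String × List Char) : List String :=
  if st.2 ≠ [] then st.1 ++ [pvLw st.2] else st.1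

-- tokenization invariant: A's fold + finalisation = split₀ of the delimiter-normalized chars, lowered
theorem pv_tok (cs : List Char) : ∀ (ws : List String) (w : List Char),
    (∀ c ∈ cs, pvDomChar c = true) →
    pvFin (cs.foldl paStep (ws, w))
      = ws ++ (PySem.Chars.split₀.go (cs.map (fun c => if c ∈ pvDelims then ' ' else c)) w.reverse []).map pvLw := by
  induction cs with
  | nil =>
    intro ws w _
    simp only [List.foldl_nil, List.map_nil, PySem.Chars.split₀.go, pvFin]
    cases w with
    | nil => simp
    | cons x xs => simp [pvLw]
  | cons c rest ih =>
    intro ws w hdom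
    have hdc : pvDomChar c = true := hdom c (List.mem_cons_self ..)
    have hdr : ∀ x ∈ rest, pvDomChar x = true := fun x hx => hdom x (List.mem_cons_of_mem _ hx)
    simp only [List.foldl_cons, List.map_cons]
    by_cases hc : c ∈ pvDelims
    · simp only [hc, if_true, paStep, PySem.Chars.split₀.go,
        show PySem.Chars.isspace ' ' = true from rfl, if_true]
      cases w with
      | nil => simpa using ih ws [] hdr
      | cons x xs =>
        rw [if_pos (List.cons_ne_nil x xs),
          if_neg (by simp : ¬((x :: xs).reverse.isEmpty = true)),
          show String.ofList (PySem.Chars.lower (x :: xs)) = pvLw (x :: xs) from rfl,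
          pv_go_acc _ [] [(x :: xs).reverse.reverse],
          ih (ws ++ [pvLw (x :: xs)]) [] hdr]
        simp
    · simp only [hc, if_false, paStep]
      simp only [PySem.Chars.split₀.go, pv_not_space c hdc hc, Bool.false_eq_true, if_false]
      rw [show c :: w.reverse = (w ++ [c]).reverse by simp]
      exact ih ws (w ++ [c]) hdr

-- the adjacent-pair scan over range(1, len(ws)) equals "ws == sorted(ws)"
theorem pv_adj (ws : List String) :
    ((PySem.List.pyRange 1 (PySem.List.len ws) 1).all
      (fun i => !(decide (PySem.List.pyGetD ws i "" < PySem.List.pyGetD ws (i - 1) ""))))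
      = (ws == PySem.List.sorted ws (fun w => w) false) := by
  have hlen : PySem.List.len ws = (ws.length : Int) := by simp [PySem.List.len]
  rw [hlen]
  by_cases hC : ∀ (k : Nat) (h : k + 1 < ws.length), ws[k] ≤ ws[k + 1]
  · have hP : ws.Pairwise (fun a b => a ≤ b) := by
      rw [← List.isChain_iff_pairwise]
      exact List.isChain_iff_getElem.mpr hC
    rw [PySem.List.sorted_eq_self_of_pairwise ws _ hP]
    simp only [BEq.rfl]
    rw [List.all_eq_true]
    intro i hi
    rw [PySem.List.mem_pyRange_one] at hi
    obtain ⟨k, rfl⟩ : ∃ k : Nat, i = (k : Int) + 1 := ⟨(i - 1).toNat, by omega⟩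
    have hk : k + 1 < ws.length := by omega
    rw [show ((k : Int) + 1) = ((k + 1 : Nat) : Int) by push_cast; ring, PySem.List.pyGetD_natCast,
      show (((k + 1 : Nat) : Int) - 1) = ((k : Nat) : Int) by push_cast; ring, PySem.List.pyGetD_natCast,
      List.getD_eq_getElem ws _ hk, List.getD_eq_getElem ws _ (by omega)]
    simp [not_lt.mpr (hC k hk)]
  · push Not at hC
    obtain ⟨k, hk, hlt'⟩ := hC
    have hR : (ws == PySem.List.sorted ws (fun w => w) false) = false := by
      rw [beq_eq_false_iff_ne]
      intro he
      have := PySem.List.sorted_pairwise ws (fun w => w)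
      rw [← he] at this
      exact absurd (List.pairwise_iff_getElem.mp this k (k + 1) (by omega) hk (by omega))
        (not_le.mpr hlt')
    rw [hR, List.all_eq_false]
    refine ⟨(k : Int) + 1, ?_, ?_⟩
    · rw [PySem.List.mem_pyRange_one]; omega
    · rw [show ((k : Int) + 1) = ((k + 1 : Nat) : Int) by push_cast; ring, PySem.List.pyGetD_natCast,
        show (((k + 1 : Nat) : Int) - 1) = ((k : Nat) : Int) by push_cast; ring, PySem.List.pyGetD_natCast,
        List.getD_eq_getElem ws _ hk, List.getD_eq_getElem ws _ (by omega)]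
      simp [hlt']

-- ===== VERDICT (by name: the statement is the Claim_ definition above) =====
theorem is_lexicographically_ordered_spec : Claim_equal_is_lexicographically_ordered := by
  intro s hdom
  unfold Spec_is_lexicographically_ordered is_lexicographically_ordered is_lexicographically_ordered_alt
  simp only []
  have hdom' : ∀ c ∈ s.toList, pvDomChar c = true := by
    simpa [Dom_is_lexicographically_ordered, pvDomStr, List.all_eq_true] using hdom
  have htok := pv_tok s.toList [] [] hdom'
  simp only [List.reverse_nil, List.nil_append] at htok
  have hwords :
      (PySem.Str.split₀ (String.ofList (s.toList.map (fun c => if c ∈ pvDelims then ' ' else c)))).map PySem.Str.lower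
        = (PySem.Chars.split₀.go (s.toList.map (fun c => if c ∈ pvDelims then ' ' else c)) [] []).map pvLw := by
    simp only [PySem.Str.split₀, PySem.Chars.split₀, String.toList_ofList, List.map_map]
    refine List.map_congr_left (fun t _ => ?_)
    simp only [Function.comp, PySem.Str.lower, pvLw, String.toList_ofList]
  rw [← hwords] at htok
  rw [show (if (s.toList.foldl paStep ([], [])).2 ≠ [] then
        (s.toList.foldl paStep ([], [])).1 ++ [String.ofList (PySem.Chars.lower (s.toList.foldl paStep ([], [])).2)]
      else (s.toList.foldl paStep ([], [])).1) = pvFin (s.toList.foldl paStep ([], [])) from by simp [pvFin, pvLw]]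
  rw [htok]
  exact (pv_adj _)
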